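-- pv_equiv track=rewrite | github.com/yasufumi-nakata/Pytra | src/hooks/scala/emitter/scala_native_emitter.py | _is_direct_call
-- ===== SOURCE A (Python) =====
-- def _strip_outer_parens(expr: str) -> str:
--     cur = expr.strip()
--     while len(cur) >= 2 and cur[0] == "(" and cur[-1] == ")":
--         depth = 0
--         ok = True
--         i = 0
--         while i < len(cur):
--             ch = cur[i]
--             if ch == "(":
--                 depth += 1
--             elif ch == ")":
--                 depth -= 1
--                 if depth == 0 and i != len(cur) - 1:
--                     ok = False
--                     break
--                 if depth < 0:
--                     ok = False
--                     break
--             i += 1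
--         if not ok or depth != 0:
--             break
--         cur = cur[1:-1].strip()
--     return cur
--
-- def _is_direct_call(expr: str, fn_name: str) -> bool:
--     txt = _strip_outer_parens(expr)
--     prefix = fn_name + "("
--     if not txt.startswith(prefix) or not txt.endswith(")"):
--         return False
--     depth = 0
--     i = len(fn_name)
--     while i < len(txt):
--         ch = txt[i]
--         if ch == "(":
--             depth += 1
--         elif ch == ")":
--             depth -= 1
--             if depth == 0 and i != len(txt) - 1:
--                 return False
--             if depth < 0:
--                 return False
--         i += 1
--     return depth == 0
-- ===== SOURCE B (Python) =====
-- def _is_direct_call(expr: str, fn_name: str) -> bool: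
--     s = expr.strip()
--     # one pass: matching-partner index for every '(' that has a partner
--     partner = {}
--     stack = []
--     for k, ch in enumerate(s):
--         if ch == "(":
--             stack.append(k)
--         elif ch == ")":
--             if stack:
--                 partner[stack.pop()] = k
--     # two-pointer peel of redundant outer parens (region s[i:j], ends non-space)
--     i, j = 0, len(s)
--     while j - i >= 2 and partner.get(i) == j - 1:
--         i, j = i + 1, j - 1
--         while i < j and s[i].isspace():
--             i += 1
--         while i < j and s[j - 1].isspace():
--             j -= 1
--     n = len(fn_name)
--     p = i + n
--     return p < j and s[i:p] == fn_name and s[p] == "(" and partner.get(p) == j - 1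
-- ===== Notes on version B (the rewrite author's own statement) =====
-- stated objective: faster
-- what changed: A repeatedly rescans the whole string (one full depth-scan per peeled paren pair, and again for the final call test); B makes ONE stack pass that records each '(' 's matching-partner index in a dict, then peels redundant outer parens with a two-pointer loop and decides the call test by two O(1) partner lookups.
import Mathlib
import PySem

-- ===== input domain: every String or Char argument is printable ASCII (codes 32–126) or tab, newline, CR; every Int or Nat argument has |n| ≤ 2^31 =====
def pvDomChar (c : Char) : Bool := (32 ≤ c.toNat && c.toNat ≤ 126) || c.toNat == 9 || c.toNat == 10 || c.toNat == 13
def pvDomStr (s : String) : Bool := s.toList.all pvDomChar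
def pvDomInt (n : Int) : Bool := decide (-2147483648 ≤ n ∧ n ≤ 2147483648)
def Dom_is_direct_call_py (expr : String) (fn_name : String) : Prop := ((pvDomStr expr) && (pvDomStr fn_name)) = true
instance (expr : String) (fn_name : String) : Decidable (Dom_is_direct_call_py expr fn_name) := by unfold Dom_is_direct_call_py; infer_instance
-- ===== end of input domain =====

-- B replaces A's peel loop (which rescans the whole string once per stripped paren pair) by ONE
-- stack pass building a matching-partner map plus a two-pointer peel; same return value everywhere.

-- ===== PORT A =====
-- the paren-depth scan both of A's while-loops perform (break → (false, depth); normal exit → (true, depth))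
def pvScanA : List Char → Int → Bool × Int
  | [], d => (true, d)
  | c :: rest, d =>
    if c = '(' then pvScanA rest (d + 1)
    else if c = ')' then
      if d - 1 = 0 ∧ rest ≠ [] then (false, d - 1)
      else if d - 1 < 0 then (false, d - 1)
      else pvScanA rest (d - 1)
    else pvScanA rest d

-- (termination helper for pvStripOuter, cited in its decreasing_by)
lemma pv_strip_length_le (l : List Char) : (PySem.Chars.strip l).length ≤ l.length := by
  simp only [PySem.Chars.strip, PySem.Chars.rstrip, PySem.Chars.lstrip, List.length_reverse]
  calc ((l.dropWhile PySem.Chars.isspace).reverse.dropWhile PySem.Chars.isspace).length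
      ≤ (l.dropWhile PySem.Chars.isspace).reverse.length := List.length_dropWhile_le _ _
    _ ≤ l.length := by simpa using List.length_dropWhile_le PySem.Chars.isspace l

-- _strip_outer_parens' while-loop (cur[1:-1] = drop the first and last character)
def pvStripOuter (cur : List Char) : List Char :=
  if 2 ≤ cur.length ∧ cur.head? = some '(' ∧ cur.getLast? = some ')' then
    if (pvScanA cur 0).1 ∧ (pvScanA cur 0).2 = 0 then
      pvStripOuter (PySem.Chars.strip ((cur.drop 1).dropLast))
    else cur
  else cur
termination_by cur.length
decreasing_by
  rename_i h _
  have h1 := pv_strip_length_le ((cur.drop 1).dropLast)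
  have h2 : ((cur.drop 1).dropLast).length = cur.length - 2 := by
    simp [List.length_dropLast]
    omega
  omega

-- _is_direct_call's prefix/suffix test followed by its scan loop (from index len(fn_name))
def pvFinalA (txt : List Char) (fnl : List Char) : Bool :=
  if PySem.Chars.startswith txt (fnl ++ ['(']) ∧ PySem.Chars.endswith txt [')'] then
    (pvScanA (txt.drop fnl.length) 0).1 && decide ((pvScanA (txt.drop fnl.length) 0).2 = 0)
  else false

def is_direct_call_py (expr : String) (fn_name : String) : Bool :=
  pvFinalA (pvStripOuter (PySem.Chars.strip expr.toList)) fn_name.toList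

-- ===== PORT B =====
-- one pass with a stack: matching-partner index of every matched '('
def pvPartnerGo : List Char → Nat → List Nat → PySem.Dict Nat Nat → PySem.Dict Nat Nat
  | [], _, _, m => m
  | c :: rest, k, st, m =>
    if c = '(' then pvPartnerGo rest (k + 1) (k :: st) m
    else if c = ')' then
      match st with
      | [] => pvPartnerGo rest (k + 1) [] m
      | p :: st' => pvPartnerGo rest (k + 1) st' (m.insert p k)
    else pvPartnerGo rest (k + 1) st m

def pvPartner (s : List Char) : PySem.Dict Nat Nat := pvPartnerGo s 0 [] PySem.Dict.empty

-- while i < j and s[i].isspace(): i += 1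
def pvSkipF (s : List Char) (i j : Nat) : Nat :=
  if i < j ∧ s[i]?.any PySem.Chars.isspace then pvSkipF s (i + 1) j else i
termination_by j - i

-- while i < j and s[j-1].isspace(): j -= 1
def pvSkipB (s : List Char) (i j : Nat) : Nat :=
  if i < j ∧ s[j-1]?.any PySem.Chars.isspace then pvSkipB s i (j - 1) else j
termination_by j

-- (termination helpers for pvPeel, cited in its decreasing_by)
lemma pvSkipF_ge (s : List Char) (i j : Nat) : i ≤ pvSkipF s i j := by
  induction i using pvSkipF.induct (s := s) (j := j) with
  | case1 i h ih => rw [pvSkipF, if_pos h]; omega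
  | case2 i h => rw [pvSkipF, if_neg h]

lemma pvSkipB_le (s : List Char) (i j : Nat) : pvSkipB s i j ≤ j := by
  induction j using pvSkipB.induct (s := s) (i := i) with
  | case1 j h ih => rw [pvSkipB, if_pos h]; omega
  | case2 j h => rw [pvSkipB, if_neg h]

-- two-pointer peel over the partner map (region is s[i:j])
def pvPeel (s : List Char) (P : PySem.Dict Nat Nat) (i j : Nat) : Nat × Nat :=
  if 2 ≤ j - i ∧ P.get? i = some (j - 1) then
    let i1 := pvSkipF s (i + 1) (j - 1)
    let j1 := pvSkipB s i1 (j - 1)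
    pvPeel s P i1 j1
  else (i, j)
termination_by j - i
decreasing_by
  rename_i h
  have h1 := pvSkipF_ge s (i + 1) (j - 1)
  have h2 := pvSkipB_le s (pvSkipF s (i + 1) (j - 1)) (j - 1)
  omega

-- p < j and s[i:p] == fn_name and s[p] == "(" and partner.get(p) == j - 1
def pvFinalB (s : List Char) (P : PySem.Dict Nat Nat) (i j : Nat) (fnl : List Char) : Bool :=
  decide (i + fnl.length < j) && ((s.drop i).take fnl.length == fnl)
    && (s[i + fnl.length]? == some '(') && (P.get? (i + fnl.length) == some (j - 1))

def is_direct_call_py_alt (expr : String) (fn_name : String) : Bool :=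
  let s := PySem.Chars.strip expr.toList
  let P := pvPartner s
  let ij := pvPeel s P 0 s.length
  pvFinalB s P ij.1 ij.2 fn_name.toList

-- ===== PRECONDITION & SPEC =====
def Spec_is_direct_call_py (expr : String) (fn_name : String) (out : Bool) : Prop := out = is_direct_call_py_alt expr fn_name
instance (expr : String) (fn_name : String) (out : Bool) : Decidable (Spec_is_direct_call_py expr fn_name out) := by unfold Spec_is_direct_call_py; infer_instance

-- ===== CLAIM (what is proved, stated in full; the proofs are below) =====
def Claim_equal_is_direct_call_py : Prop := ∀ (expr : String) (fn_name : String), Dom_is_direct_call_py expr fn_name → Spec_is_direct_call_py expr fn_name (is_direct_call_py expr fn_name)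

-- ===== LEMMAS AND PROOFS =====

-- paren weight of a character and prefix depth after k characters
def pvδ (c : Char) : Int := if c = '(' then 1 else if c = ')' then -1 else 0
def pvD (s : List Char) (k : Nat) : Int := ((s.take k).map pvδ).sum
-- '(' at p still open after the first k characters
def pvOpen (s : List Char) (p k : Nat) : Prop :=
  s[p]? = some '(' ∧ p < k ∧ ∀ r, p < r → r ≤ k → pvD s p < pvD s r
-- the '(' at p is matched by the ')' at q
def pvMatched (s : List Char) (p q : Nat) : Prop :=
  s[p]? = some '(' ∧ s[q]? = some ')' ∧ p < q ∧
    (∀ r, p < r → r ≤ q → pvD s p < pvD s r) ∧ pvD s (q + 1) = pvD s p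
-- the region s[i:j] as a list
def pvReg (s : List Char) (i j : Nat) : List Char := (s.drop i).take (j - i)

lemma pvD_zero (s : List Char) : pvD s 0 = 0 := by simp [pvD]

lemma pvD_cons (c : Char) (l : List Char) (k : Nat) :
    pvD (c :: l) (k + 1) = pvδ c + pvD l k := by simp [pvD]

lemma pvD_succ (s : List Char) (k : Nat) (c : Char) (h : s[k]? = some c) :
    pvD s (k + 1) = pvD s k + pvδ c := by
  simp [pvD, List.take_add_one, h]

lemma pvδ_cases (c : Char) : pvδ c = 1 ∧ c = '(' ∨ pvδ c = -1 ∧ c = ')' ∨ pvδ c = 0 := by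
  unfold pvδ; split_ifs with h1 h2 <;> simp_all

lemma pvScanA_iff (l : List Char) : ∀ (d : Int), 0 < d →
    (pvScanA l d = (true, 0) ↔
      ((∀ k, k < l.length → 0 < d + pvD l k) ∧ d + pvD l l.length = 0)) := by
  induction l with
  | nil =>
    intro d hd
    simp [pvScanA, pvD_zero]
  | cons c rest ih =>
    intro d hd
    have hcond : ((∀ k, k < (c :: rest).length → 0 < d + pvD (c :: rest) k) ∧
        d + pvD (c :: rest) (c :: rest).length = 0) ↔
        ((∀ k, k < rest.length → 0 < (d + pvδ c) + pvD rest k) ∧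
        (d + pvδ c) + pvD rest rest.length = 0) := by
      constructor
      · rintro ⟨h1, h2⟩
        refine ⟨fun k hk => ?_, ?_⟩
        · have := h1 (k + 1) (by simpa using Nat.succ_lt_succ hk)
          rw [pvD_cons] at this
          omega
        · rw [List.length_cons, pvD_cons] at h2
          omega
      · rintro ⟨h1, h2⟩
        refine ⟨fun k hk => ?_, ?_⟩
        · cases k with
          | zero => simpa [pvD_zero] using hd
          | succ k' =>
            have := h1 k' (by simpa using Nat.lt_of_succ_lt_succ hk)
            rw [pvD_cons]
            omega
        · rw [List.length_cons, pvD_cons]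
          omega
    rcases pvδ_cases c with ⟨hδ, hc⟩ | ⟨hδ, hc⟩ | hδ
    · -- c = '('
      subst hc
      rw [show pvScanA ('(' :: rest) d = pvScanA rest (d + 1) by simp [pvScanA]]
      rw [hcond, hδ]
      exact ih (d + 1) (by omega)
    · -- c = ')'
      subst hc
      by_cases hd1 : d = 1
      · subst hd1
        by_cases hr : rest = []
        · subst hr
          rw [show pvScanA [')'] 1 = (true, 0) by simp [pvScanA]]
          rw [hcond, hδ]
          simp [pvD_zero]
        · rw [show pvScanA (')' :: rest) 1 = (false, 0) by simp [pvScanA, hr]]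
          rw [hcond, hδ]
          constructor
          · intro h
            simp at h
          · rintro ⟨h1, h2⟩
            have h0 := h1 0 (List.length_pos_iff.mpr hr)
            rw [pvD_zero] at h0
            omega
      · have h2d : 2 ≤ d := by omega
        rw [show pvScanA (')' :: rest) d = pvScanA rest (d - 1) by
          simp only [pvScanA]
          rw [if_neg (by decide), if_pos trivial, if_neg (by rintro ⟨h1, -⟩; omega),
            if_neg (by omega)]]
        rw [hcond, hδ]
        have := ih (d - 1) (by omega)
        constructor
        · intro h
          rcases (this.mp h) with ⟨ha, hb⟩
          exact ⟨fun k hk => by have := ha k hk; omega, by omega⟩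
        · intro h
          apply this.mpr
          rcases h with ⟨ha, hb⟩
          exact ⟨fun k hk => by have := ha k hk; omega, by omega⟩
    · -- other character
      have hc1 : c ≠ '(' := by intro h; subst h; simp [pvδ] at hδ
      have hc2 : c ≠ ')' := by intro h; subst h; simp [pvδ] at hδ
      rw [show pvScanA (c :: rest) d = pvScanA rest d by simp [pvScanA, hc1, hc2]]
      rw [hcond, hδ]
      simpa using ih d hd

lemma pvReg_getElem? (s : List Char) (i j k : Nat) (h : k < j - i) :
    (pvReg s i j)[k]? = s[i + k]? := by
  simp [pvReg, List.getElem?_take, h, Nat.add_comm i k]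

lemma pvReg_length (s : List Char) (i j : Nat) (hij : i ≤ j) (hj : j ≤ s.length) :
    (pvReg s i j).length = j - i := by
  simp [pvReg]; omega

lemma pvReg_all (s : List Char) : pvReg s 0 s.length = s := by simp [pvReg]

lemma pvReg_cons (s : List Char) (i j : Nat) (c : Char) (hij : i < j) (h : s[i]? = some c) :
    pvReg s i j = c :: pvReg s (i + 1) j := by
  have hi : i < s.length := by
    by_contra hx
    rw [List.getElem?_eq_none (by omega)] at h
    simp at h
  have hv : s[i] = c := by
    have := List.getElem?_eq_getElem hi
    rw [h] at this
    exact (Option.some.injEq _ _ ▸ this.symm)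
  have hd : s.drop i = c :: s.drop (i + 1) := by
    rw [List.drop_eq_getElem_cons hi, hv]
  have hji : j - i = (j - (i + 1)) + 1 := by omega
  rw [pvReg, pvReg, hd, hji, List.take_succ_cons]

lemma pvReg_snoc (s : List Char) (i j : Nat) (c : Char) (hij : i < j) (hj : j ≤ s.length)
    (h : s[j-1]? = some c) : pvReg s i j = pvReg s i (j - 1) ++ [c] := by
  have hji : j - i = (j - 1 - i) + 1 := by omega
  have hidx : (s.drop i)[j - 1 - i]? = some c := by
    rw [List.getElem?_drop]
    have : i + (j - 1 - i) = j - 1 := by omega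
    rw [this, h]
  rw [pvReg, pvReg, hji, List.take_add_one, hidx]
  rfl

lemma pvReg_dropLast (s : List Char) (i j : Nat) (hij : i ≤ j) (hj : j ≤ s.length) :
    (pvReg s i j).dropLast = pvReg s i (j - 1) := by
  rw [List.dropLast_eq_take, pvReg_length s i j hij hj, pvReg, pvReg, List.take_take]
  have : min (j - i - 1) (j - i) = j - 1 - i := by omega
  rw [this]

lemma pvReg_drop (s : List Char) (i j n : Nat) : (pvReg s i j).drop n = pvReg s (i + n) j := by
  rw [pvReg, pvReg, List.drop_take, List.drop_drop]
  congr 1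
  omega

lemma pvD_reg (s : List Char) (i j k : Nat) (hij : i ≤ j) (hj : j ≤ s.length) (hk : k ≤ j - i) :
    pvD (pvReg s i j) k = pvD s (i + k) - pvD s i := by
  have h1 : (pvReg s i j).take k = (s.drop i).take k := by
    rw [pvReg, List.take_take, Nat.min_eq_left hk]
  have h2 : (s.drop i).take k = (s.take (i + k)).drop i := by
    rw [List.drop_take]
    congr 1
    omega
  have h3 : s.take (i + k) = s.take i ++ (s.take (i + k)).drop i := by
    conv_lhs => rw [← List.take_append_drop i (s.take (i + k))]
    rw [List.take_take, Nat.min_eq_left (by omega)]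
  have h4 : pvD s (i + k) = pvD s i + ((((s.take (i + k)).drop i).map pvδ).sum) := by
    rw [pvD, pvD]
    conv_lhs => rw [h3]
    rw [List.map_append, List.sum_append]
  rw [pvD, h1, h2]
  omega

lemma pvScanA_reg_iff (s : List Char) (a j : Nat) (haj : a < j) (hj : j ≤ s.length)
    (hpar : s[a]? = some '(') :
    (s[j-1]? = some ')' ∧ pvScanA (pvReg s a j) 0 = (true, 0)) ↔ pvMatched s a (j - 1) := by
  have hcons : pvReg s a j = '(' :: pvReg s (a + 1) j := pvReg_cons s a j '(' haj hpar
  have hscan0 : pvScanA (pvReg s a j) 0 = pvScanA (pvReg s (a + 1) j) 1 := by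
    rw [hcons]
    simp [pvScanA]
  have hlen : (pvReg s (a + 1) j).length = j - (a + 1) := pvReg_length s (a + 1) j (by omega) hj
  have hDa1 : pvD s (a + 1) = pvD s a + 1 := by
    rw [pvD_succ s a '(' hpar]
    simp [pvδ]
  have hDt : ∀ k, k ≤ j - (a + 1) → pvD (pvReg s (a + 1) j) k = pvD s (a + 1 + k) - pvD s a - 1 := by
    intro k hk
    rw [pvD_reg s (a + 1) j k (by omega) hj hk, hDa1]
    ring
  rw [hscan0, pvScanA_iff (pvReg s (a + 1) j) 1 one_pos, hlen]
  constructor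
  · rintro ⟨hlast, h1, h2⟩
    have halt : a < j - 1 := by
      rcases Nat.lt_or_ge a (j - 1) with h | h
      · exact h
      · have ha' : a = j - 1 := by omega
        rw [← ha', hpar] at hlast
        simp at hlast
    refine ⟨hpar, hlast, by omega, fun r hr1 hr2 => ?_, ?_⟩
    · have hk : r - a - 1 < j - (a + 1) := by omega
      have := h1 (r - a - 1) hk
      rw [hDt (r - a - 1) (by omega)] at this
      have hra : a + 1 + (r - a - 1) = r := by omega
      rw [hra] at this
      omega
    · have := h2
      rw [hDt (j - (a + 1)) (le_refl _)] at this
      have hra : a + 1 + (j - (a + 1)) = j := by omega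
      rw [hra] at this
      have hj1 : j - 1 + 1 = j := by omega
      rw [hj1]
      omega
  · rintro ⟨-, hlast, halt, hall, hend⟩
    refine ⟨hlast, fun k hk => ?_, ?_⟩
    · rw [hDt k (by omega)]
      have := hall (a + 1 + k) (by omega) (by omega)
      omega
    · rw [hDt (j - (a + 1)) (le_refl _)]
      have hra : a + 1 + (j - (a + 1)) = j := by omega
      rw [hra]
      have hj1 : j - 1 + 1 = j := by omega
      rw [hj1] at hend
      omega

lemma pvMatched_open (s : List Char) (p k : Nat) (h : pvMatched s p k) : pvOpen s p k :=
  ⟨h.1, h.2.2.1, h.2.2.2.1⟩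

lemma pvOpen_not_matched_lt (s : List Char) (p q k : Nat)
    (ho : pvOpen s p k) (hm : pvMatched s p q) (hq : q < k) : False := by
  have hpq := hm.2.2.1
  have h1 := ho.2.2 (q + 1) (by omega) (by omega)
  rw [hm.2.2.2.2] at h1
  exact lt_irrefl _ h1

lemma pv_getElem?_lt (s : List Char) (k : Nat) (c : Char) (h : s[k]? = some c) : k < s.length := by
  by_contra hx
  rw [List.getElem?_eq_none (by omega)] at h
  simp at h

lemma pvMaxOpen_matched (s : List Char) (p0 k : Nat)
    (h0 : pvOpen s p0 k) (hmax : ∀ p, pvOpen s p k → p ≤ p0) (hk : s[k]? = some ')') :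
    pvMatched s p0 k := by
  obtain ⟨hp0, hp0k, hopen⟩ := h0
  have hklen : k < s.length := pv_getElem?_lt s k ')' hk
  have hDk : pvD s p0 < pvD s k := hopen k hp0k (le_refl k)
  have hkey : pvD s k = pvD s p0 + 1 := by
    by_contra hne
    have h2 : pvD s p0 + 2 ≤ pvD s k := by omega
    have hp1 : (fun r => p0 < r ∧ pvD s r = pvD s p0 + 1) (p0 + 1) := by
      refine ⟨by omega, ?_⟩
      rw [pvD_succ s p0 '(' hp0]
      simp [pvδ]
    have hp1k : p0 + 1 ≤ k := by omega
    set r0 := Nat.findGreatest (fun r => p0 < r ∧ pvD s r = pvD s p0 + 1) k with hr0def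
    have hPr0 : p0 < r0 ∧ pvD s r0 = pvD s p0 + 1 := by
      have := Nat.findGreatest_spec (P := fun r => p0 < r ∧ pvD s r = pvD s p0 + 1) hp1k hp1
      simpa [hr0def] using this
    have hr0k : r0 ≤ k := Nat.findGreatest_le k
    have hr0ne : r0 ≠ k := by
      intro h
      rw [h] at hPr0
      omega
    have hgt : ∀ r, r0 < r → r ≤ k → pvD s p0 + 2 ≤ pvD s r := by
      intro r hr1 hr2
      have hnP := Nat.findGreatest_is_greatest (hr0def ▸ hr1) hr2
      have hDr := hopen r (by omega) hr2
      simp only [not_and] at hnP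
      have := hnP (by omega)
      omega
    have hr0len : r0 < s.length := by omega
    have hc0 : s[r0]? = some s[r0] := List.getElem?_eq_getElem hr0len
    have hstep := pvD_succ s r0 s[r0] hc0
    have hup : pvD s (r0 + 1) = pvD s r0 + 1 := by
      have ha := hgt (r0 + 1) (by omega) (by omega)
      rcases pvδ_cases s[r0] with ⟨hδ, -⟩ | ⟨hδ, -⟩ | hδ <;> omega
    have hcpar : s[r0] = '(' := by
      rcases pvδ_cases s[r0] with ⟨-, hc⟩ | ⟨hδ, -⟩ | hδ
      · exact hc
      · omega
      · omega
    have hr0open : pvOpen s r0 k := by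
      refine ⟨by rw [hc0, hcpar], by omega, fun r hr1 hr2 => ?_⟩
      have := hgt r hr1 hr2
      omega
    have := hmax r0 hr0open
    omega
  refine ⟨hp0, hk, hp0k, hopen, ?_⟩
  rw [pvD_succ s k ')' hk]
  simp [pvδ]
  omega

lemma pvOpen_elim (s : List Char) (p k : Nat) (h : pvOpen s p (k + 1)) :
    p = k ∨ pvOpen s p k := by
  by_cases hp : p = k
  · exact Or.inl hp
  · exact Or.inr ⟨h.1, by have := h.2.1; omega, fun r h1 h2 => h.2.2 r h1 (by omega)⟩

lemma pvOpen_extend (s : List Char) (p k : Nat) (h : pvOpen s p k)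
    (hD : pvD s p < pvD s (k + 1)) : pvOpen s p (k + 1) := by
  refine ⟨h.1, by have := h.2.1; omega, fun r h1 h2 => ?_⟩
  rcases Nat.lt_or_ge r (k + 1) with hr | hr
  · exact h.2.2 r h1 (by omega)
  · have : r = k + 1 := by omega
    rw [this]
    exact hD

lemma pvPartnerGo_spec (s : List Char) :
    ∀ (l : List Char) (k : Nat) (st : List Nat) (m : PySem.Dict Nat Nat),
    l = s.drop k → k ≤ s.length →
    (∀ p, p ∈ st ↔ pvOpen s p k) →
    List.Pairwise (· > ·) st →
    (∀ p q, m.get? p = some q ↔ (pvMatched s p q ∧ q < k)) →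
    ∀ p q, (pvPartnerGo l k st m).get? p = some q ↔ pvMatched s p q := by
  intro l
  induction l with
  | nil =>
    intro k st m hl hk hst hpw hm p q
    rw [pvPartnerGo, hm]
    have hklen : s.length ≤ k := by
      have := congrArg List.length hl
      simp at this
      omega
    constructor
    · exact fun h => h.1
    · intro h
      exact ⟨h, by have := pv_getElem?_lt s q ')' h.2.1; omega⟩
  | cons c rest ih =>
    intro k st m hl hk hst hpw hm p q
    have hck : s[k]? = some c := by
      have : (s.drop k)[0]? = some c := by rw [← hl]; rfl
      rwa [List.getElem?_drop, Nat.add_zero] at this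
    have hrest : rest = s.drop (k + 1) := by
      have : (s.drop k).drop 1 = rest := by rw [← hl]; rfl
      rw [← this, List.drop_drop]
    have hklen : k < s.length := pv_getElem?_lt s k c hck
    have hDsucc := pvD_succ s k c hck
    by_cases hc1 : c = '('
    · -- '(' : push k
      subst hc1
      rw [show pvPartnerGo ('(' :: rest) k st m = pvPartnerGo rest (k + 1) (k :: st) m by
        simp [pvPartnerGo]]
      have hDup : pvD s (k + 1) = pvD s k + 1 := by rw [hDsucc]; simp [pvδ]
      apply ih (k + 1) (k :: st) m hrest (by omega)
      · intro p'
        constructor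
        · intro hmem
          rcases List.mem_cons.mp hmem with hpk | hmem'
          · rw [hpk]
            refine ⟨hck, by omega, fun r h1 h2 => ?_⟩
            have : r = k + 1 := by omega
            rw [this]
            omega
          · have ho := (hst p').mp hmem'
            exact pvOpen_extend s p' k ho (by have := ho.2.2 k ho.2.1 (le_refl k); omega)
        · intro ho
          rcases pvOpen_elim s p' k ho with hpk | ho'
          · exact List.mem_cons.mpr (Or.inl hpk)
          · exact List.mem_cons.mpr (Or.inr ((hst p').mpr ho'))
      · refine List.pairwise_cons.mpr ⟨fun p' hmem => ?_, hpw⟩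
        exact ((hst p').mp hmem).2.1
      · intro p' q'
        rw [hm]
        constructor
        · rintro ⟨hM, hq⟩
          exact ⟨hM, by omega⟩
        · rintro ⟨hM, hq⟩
          refine ⟨hM, ?_⟩
          rcases Nat.lt_or_ge q' k with h | h
          · exact h
          · have : q' = k := by omega
            rw [this] at hM
            rw [hM.2.1] at hck
            simp at hck
    · by_cases hc2 : c = ')'
      · subst hc2
        have hDdown : pvD s (k + 1) = pvD s k - 1 := by rw [hDsucc]; simp [pvδ]; ring
        -- no '(' is open at k+1 means: opens at k+1 are st minus its head
        cases st with
        | nil =>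
          rw [show pvPartnerGo (')' :: rest) k [] m = pvPartnerGo rest (k + 1) [] m by
            simp [pvPartnerGo]]
          apply ih (k + 1) [] m hrest (by omega)
          · intro p'
            simp only [List.not_mem_nil, false_iff]
            intro ho
            rcases pvOpen_elim s p' k ho with hpk | ho'
            · have hx := ho.1
              rw [hpk, hck] at hx
              exact absurd hx (by decide)
            · exact (by simpa using (hst p').mpr ho')
          · exact List.Pairwise.nil
          · intro p' q'
            rw [hm]
            constructor
            · rintro ⟨hM, hq⟩
              exact ⟨hM, by omega⟩
            · rintro ⟨hM, hq⟩
              refine ⟨hM, ?_⟩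
              rcases Nat.lt_or_ge q' k with h | h
              · exact h
              · have hqk : q' = k := by omega
                rw [hqk] at hM
                have ho := pvMatched_open s p' k hM
                exact absurd ((hst p').mpr ho) (List.not_mem_nil)
        | cons p0 st' =>
          rw [show pvPartnerGo (')' :: rest) k (p0 :: st') m
              = pvPartnerGo rest (k + 1) st' (m.insert p0 k) by
            simp [pvPartnerGo]]
          have hopen0 : pvOpen s p0 k := (hst p0).mp (List.mem_cons_self)
          have hp0klt : p0 < k := hopen0.2.1
          have hmax : ∀ p', pvOpen s p' k → p' ≤ p0 := by
            intro p' ho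
            rcases List.mem_cons.mp ((hst p').mpr ho) with h | h
            · omega
            · have := (List.pairwise_cons.mp hpw).1 p' h
              omega
          have hM0 : pvMatched s p0 k := pvMaxOpen_matched s p0 k hopen0 hmax hck
          have hD0 : pvD s (k + 1) = pvD s p0 := hM0.2.2.2.2
          apply ih (k + 1) st' (m.insert p0 k) hrest (by omega)
          · intro p'
            constructor
            · intro hmem
              have ho := (hst p').mp (List.mem_cons.mpr (Or.inr hmem))
              have hlt : p' < p0 := by
                have := (List.pairwise_cons.mp hpw).1 p' hmem
                omega
              refine pvOpen_extend s p' k ho ?_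
              have := ho.2.2 p0 hlt (by omega)
              omega
            · intro ho
              rcases pvOpen_elim s p' k ho with hpk | ho'
              · have hx := ho.1
                rw [hpk, hck] at hx
                exact absurd hx (by decide)
              · rcases List.mem_cons.mp ((hst p').mpr ho') with h | h
                · rw [h] at ho
                  have := ho.2.2 (k + 1) (by omega) (le_refl _)
                  omega
                · exact h
          · exact (List.pairwise_cons.mp hpw).2
          · intro p' q'
            rw [PySem.Dict.get?_insert]
            by_cases hpp : p' = p0
            · subst hpp
              rw [if_pos rfl]
              constructor
              · intro h
                have hqk : q' = k := by
                  have := Option.some.injEq k q' ▸ h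
                  omega
                rw [hqk]
                exact ⟨hM0, by omega⟩
              · rintro ⟨hM, hq⟩
                have hqk : q' = k := by
                  rcases Nat.lt_or_ge q' k with h | h
                  · exact absurd (pvOpen_not_matched_lt s p' q' k hopen0 hM h) (fun x => x)
                  · omega
                rw [hqk]
            · rw [if_neg hpp, hm]
              constructor
              · rintro ⟨hM, hq⟩
                exact ⟨hM, by omega⟩
              · rintro ⟨hM, hq⟩
                refine ⟨hM, ?_⟩
                rcases Nat.lt_or_ge q' k with h | h
                · exact h
                · have hqk : q' = k := by omega
                  rw [hqk] at hM
                  have ho := pvMatched_open s p' k hM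
                  rcases List.mem_cons.mp ((hst p').mpr ho) with h' | h'
                  · exact absurd h' hpp
                  · have hlt : p' < p0 := by
                      have := (List.pairwise_cons.mp hpw).1 p' h'
                      omega
                    have h1 := ho.2.2 p0 hlt (by omega)
                    have h2 : pvD s p' = pvD s (k + 1) := hM.2.2.2.2.symm
                    omega
      · -- other character
        rw [show pvPartnerGo (c :: rest) k st m = pvPartnerGo rest (k + 1) st m by
          simp [pvPartnerGo, hc1, hc2]]
        have hDeq : pvD s (k + 1) = pvD s k := by
          rcases pvδ_cases c with ⟨-, hc⟩ | ⟨-, hc⟩ | hδ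
          · exact absurd hc hc1
          · exact absurd hc hc2
          · rw [hDsucc, hδ, add_zero]
        apply ih (k + 1) st m hrest (by omega)
        · intro p'
          rw [hst]
          constructor
          · intro ho
            refine pvOpen_extend s p' k ho ?_
            have := ho.2.2 k ho.2.1 (le_refl k)
            omega
          · intro ho
            rcases pvOpen_elim s p' k ho with hpk | ho'
            · have hx := ho.1
              rw [hpk, hck] at hx
              rw [Option.some.injEq] at hx
              exact absurd hx hc1
            · exact ho'
        · exact hpw
        · intro p' q'
          rw [hm]
          constructor
          · rintro ⟨hM, hq⟩
            exact ⟨hM, by omega⟩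
          · rintro ⟨hM, hq⟩
            refine ⟨hM, ?_⟩
            rcases Nat.lt_or_ge q' k with h | h
            · exact h
            · have hqk : q' = k := by omega
              rw [hqk] at hM
              rw [hM.2.1] at hck
              exact absurd (Option.some.injEq _ _ ▸ hck).symm hc2

lemma pvPartner_iff (s : List Char) (p q : Nat) :
    (pvPartner s).get? p = some q ↔ pvMatched s p q := by
  apply pvPartnerGo_spec s s 0 [] PySem.Dict.empty (by simp) (Nat.zero_le _)
  · intro p'
    simp only [List.not_mem_nil, false_iff]
    intro ho
    exact absurd ho.2.1 (by omega)
  · exact List.Pairwise.nil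
  · intro p' q'
    simp [PySem.Dict.get?_empty]

lemma pvSkipF_le (s : List Char) (i j : Nat) (h : i ≤ j) : pvSkipF s i j ≤ j := by
  induction i using pvSkipF.induct (s := s) (j := j) with
  | case1 i h1 ih => rw [pvSkipF, if_pos h1]; exact ih (by omega)
  | case2 i h1 => rw [pvSkipF, if_neg h1]; exact h

lemma pvSkipB_ge (s : List Char) (i j : Nat) (h : i ≤ j) : i ≤ pvSkipB s i j := by
  induction j using pvSkipB.induct (s := s) (i := i) with
  | case1 j h1 ih => rw [pvSkipB, if_pos h1]; exact ih (by omega)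
  | case2 j h1 => rw [pvSkipB, if_neg h1]; exact h

lemma pvLstrip_reg (s : List Char) (i j : Nat) (hij : i ≤ j) (hj : j ≤ s.length) :
    (pvReg s i j).dropWhile PySem.Chars.isspace = pvReg s (pvSkipF s i j) j := by
  induction i using pvSkipF.induct (s := s) (j := j) with
  | case1 i h ih =>
    have hi : i < j := h.1
    have hc : s[i]? = some s[i] := List.getElem?_eq_getElem (by omega)
    have hws : PySem.Chars.isspace s[i] = true := by
      have := h.2
      rw [hc] at this
      simpa using this
    rw [pvReg_cons s i j s[i] hi hc, List.dropWhile_cons_of_pos hws, pvSkipF, if_pos h]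
    exact ih (by omega)
  | case2 i h =>
    rw [pvSkipF, if_neg h]
    rcases Nat.lt_or_ge i j with hi | hi
    · have hc : s[i]? = some s[i] := List.getElem?_eq_getElem (by omega)
      have hws : PySem.Chars.isspace s[i] = false := by
        rcases Bool.eq_false_or_eq_true (PySem.Chars.isspace s[i]) with hx | hx
        · exact absurd ⟨hi, by rw [hc]; simpa using hx⟩ h
        · exact hx
      rw [pvReg_cons s i j s[i] hi hc, List.dropWhile_cons_of_neg (by simp [hws])]
    · have : pvReg s i j = [] := by
        rw [pvReg]
        have : j - i = 0 := by omega
        rw [this, List.take_zero]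
      rw [this]
      rfl

lemma pvRstrip_reg (s : List Char) (i j : Nat) (hij : i ≤ j) (hj : j ≤ s.length) :
    ((pvReg s i j).reverse.dropWhile PySem.Chars.isspace).reverse = pvReg s i (pvSkipB s i j) := by
  induction j using pvSkipB.induct (s := s) (i := i) with
  | case1 j h ih =>
    have hi : i < j := h.1
    have hc : s[j-1]? = some s[j-1] := List.getElem?_eq_getElem (by omega)
    have hws : PySem.Chars.isspace s[j-1] = true := by
      have := h.2
      rw [hc] at this
      simpa using this
    rw [pvReg_snoc s i j s[j-1] hi hj hc, List.reverse_append, List.reverse_singleton,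
      List.singleton_append, List.dropWhile_cons_of_pos hws, pvSkipB, if_pos h]
    exact ih (by omega) (by omega)
  | case2 j h =>
    rw [pvSkipB, if_neg h]
    rcases Nat.lt_or_ge i j with hi | hi
    · have hc : s[j-1]? = some s[j-1] := List.getElem?_eq_getElem (by omega)
      have hws : PySem.Chars.isspace s[j-1] = false := by
        rcases Bool.eq_false_or_eq_true (PySem.Chars.isspace s[j-1]) with hx | hx
        · exact absurd ⟨hi, by rw [hc]; simpa using hx⟩ h
        · exact hx
      rw [pvReg_snoc s i j s[j-1] hi hj hc, List.reverse_append, List.reverse_singleton,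
        List.singleton_append, List.dropWhile_cons_of_neg (by simp [hws])]
      simp
    · have hnil : pvReg s i j = [] := by
        rw [pvReg]
        have : j - i = 0 := by omega
        rw [this, List.take_zero]
      rw [hnil]
      rfl

lemma pvStrip_reg (s : List Char) (i j : Nat) (hij : i ≤ j) (hj : j ≤ s.length) :
    PySem.Chars.strip (pvReg s i j) = pvReg s (pvSkipF s i j) (pvSkipB s (pvSkipF s i j) j) := by
  rw [PySem.Chars.strip, PySem.Chars.lstrip, PySem.Chars.rstrip,
    pvLstrip_reg s i j hij hj, pvRstrip_reg s (pvSkipF s i j) j (pvSkipF_le s i j hij) hj]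

lemma pvStripOuter_reg (s : List Char) (i j : Nat) (hij : i ≤ j) (hj : j ≤ s.length) :
    pvStripOuter (pvReg s i j) =
      pvReg s (pvPeel s (pvPartner s) i j).1 (pvPeel s (pvPartner s) i j).2 ∧
    (pvPeel s (pvPartner s) i j).1 ≤ (pvPeel s (pvPartner s) i j).2 ∧
    (pvPeel s (pvPartner s) i j).2 ≤ j := by
  suffices H : ∀ (n i j : Nat), j - i ≤ n → i ≤ j → j ≤ s.length →
      (pvStripOuter (pvReg s i j) =
        pvReg s (pvPeel s (pvPartner s) i j).1 (pvPeel s (pvPartner s) i j).2 ∧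
      (pvPeel s (pvPartner s) i j).1 ≤ (pvPeel s (pvPartner s) i j).2 ∧
      (pvPeel s (pvPartner s) i j).2 ≤ j) by
    exact H (j - i) i j (le_refl _) hij hj
  intro n
  induction n using Nat.strong_induction_on with
  | _ n ihn =>
  intro i j hn hij hj
  by_cases h : 2 ≤ j - i ∧ (pvPartner s).get? i = some (j - 1)
  case pos =>
    have hM : pvMatched s i (j - 1) := (pvPartner_iff s i (j - 1)).mp h.2
    have hpar : s[i]? = some '(' := hM.1
    have hlast : s[j-1]? = some ')' := hM.2.1
    have hilt : i < j - 1 := hM.2.2.1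
    have hi1ge : i + 1 ≤ pvSkipF s (i + 1) (j - 1) := pvSkipF_ge s (i + 1) (j - 1)
    have hi1le : pvSkipF s (i + 1) (j - 1) ≤ j - 1 := pvSkipF_le s (i + 1) (j - 1) (by omega)
    have hj1le : pvSkipB s (pvSkipF s (i + 1) (j - 1)) (j - 1) ≤ j - 1 :=
      pvSkipB_le s (pvSkipF s (i + 1) (j - 1)) (j - 1)
    have hj1ge : pvSkipF s (i + 1) (j - 1) ≤ pvSkipB s (pvSkipF s (i + 1) (j - 1)) (j - 1) :=
      pvSkipB_ge s (pvSkipF s (i + 1) (j - 1)) (j - 1) hi1le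
    have hscan : s[j-1]? = some ')' ∧ pvScanA (pvReg s i j) 0 = (true, 0) :=
      (pvScanA_reg_iff s i j (by omega) hj hpar).mpr hM
    have hlen : (pvReg s i j).length = j - i := pvReg_length s i j hij hj
    have hhead : (pvReg s i j).head? = some '(' := by
      rw [List.head?_eq_getElem?, pvReg_getElem? s i j 0 (by omega), Nat.add_zero]
      exact hpar
    have hgetLast : (pvReg s i j).getLast? = some ')' := by
      rw [List.getLast?_eq_getElem?, hlen, pvReg_getElem? s i j (j - i - 1) (by omega)]
      have : i + (j - i - 1) = j - 1 := by omega
      rw [this]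
      exact hlast
    have hdrop : (pvReg s i j).drop 1 = pvReg s (i + 1) j := pvReg_drop s i j 1
    have hdl : (pvReg s (i + 1) j).dropLast = pvReg s (i + 1) (j - 1) :=
      pvReg_dropLast s (i + 1) j (by omega) hj
    have hstrip : PySem.Chars.strip (pvReg s (i + 1) (j - 1)) =
        pvReg s (pvSkipF s (i + 1) (j - 1)) (pvSkipB s (pvSkipF s (i + 1) (j - 1)) (j - 1)) :=
      pvStrip_reg s (i + 1) (j - 1) (by omega) (by omega)
    have hstep : pvStripOuter (pvReg s i j) =
        pvStripOuter (pvReg s (pvSkipF s (i + 1) (j - 1))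
          (pvSkipB s (pvSkipF s (i + 1) (j - 1)) (j - 1))) := by
      rw [pvStripOuter]
      rw [if_pos ⟨by omega, hhead, hgetLast⟩]
      rw [if_pos ⟨by rw [hscan.2], by rw [hscan.2]⟩]
      rw [hdrop, hdl, hstrip]
    have hpeel : pvPeel s (pvPartner s) i j =
        pvPeel s (pvPartner s) (pvSkipF s (i + 1) (j - 1))
          (pvSkipB s (pvSkipF s (i + 1) (j - 1)) (j - 1)) := by
      rw [pvPeel, if_pos h]
    rcases ihn (pvSkipB s (pvSkipF s (i + 1) (j - 1)) (j - 1) - pvSkipF s (i + 1) (j - 1))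
        (by omega) (pvSkipF s (i + 1) (j - 1)) (pvSkipB s (pvSkipF s (i + 1) (j - 1)) (j - 1))
        (le_refl _) hj1ge (by omega) with ⟨e1, e2, e3⟩
    rw [hstep, hpeel]
    exact ⟨e1, e2, by omega⟩
  case neg =>
    rw [pvPeel, if_neg h]
    refine ⟨?_, hij, le_refl j⟩
    rw [pvStripOuter]
    by_cases h1 : 2 ≤ (pvReg s i j).length ∧ (pvReg s i j).head? = some '('
        ∧ (pvReg s i j).getLast? = some ')'
    · rw [if_pos h1]
      have hlen : (pvReg s i j).length = j - i := pvReg_length s i j hij hj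
      have hji : 2 ≤ j - i := by omega
      have hpar : s[i]? = some '(' := by
        have := h1.2.1
        rwa [List.head?_eq_getElem?, pvReg_getElem? s i j 0 (by omega), Nat.add_zero] at this
      have hlast : s[j-1]? = some ')' := by
        have := h1.2.2
        rw [List.getLast?_eq_getElem?, hlen, pvReg_getElem? s i j (j - i - 1) (by omega)] at this
        have he : i + (j - i - 1) = j - 1 := by omega
        rwa [he] at this
      rw [if_neg ?_]
      intro h2
      have hsc : pvScanA (pvReg s i j) 0 = (true, 0) := by
        have := Prod.mk.injEq (pvScanA (pvReg s i j) 0).1 (pvScanA (pvReg s i j) 0).2 true 0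
        rw [← this] at h2
        exact h2
      have hM : pvMatched s i (j - 1) := (pvScanA_reg_iff s i j (by omega) hj hpar).mp ⟨hlast, hsc⟩
      exact h ⟨hji, (pvPartner_iff s i (j - 1)).mpr hM⟩
    · rw [if_neg h1]

lemma pvStartswith_reg (s : List Char) (i j : Nat) (hij : i ≤ j) (hj : j ≤ s.length)
    (fnl : List Char) :
    PySem.Chars.startswith (pvReg s i j) (fnl ++ ['(']) = true ↔
      (i + fnl.length < j ∧ (s.drop i).take fnl.length = fnl ∧ s[i + fnl.length]? = some '(') := by
  rw [PySem.Chars.startswith_iff]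
  have hlenreg : (pvReg s i j).length = j - i := pvReg_length s i j hij hj
  constructor
  · rintro ⟨t, ht⟩
    rw [List.append_assoc, List.singleton_append] at ht
    have hlen : fnl.length + (t.length + 1) = j - i := by
      have := congrArg List.length ht
      simpa [hlenreg] using this
    have hb1 : i + fnl.length < j := by omega
    have htake : (pvReg s i j).take fnl.length = fnl := by
      rw [← ht, List.take_left']
      rfl
    have htake2 : (pvReg s i j).take fnl.length = (s.drop i).take fnl.length := by
      rw [pvReg, List.take_take, Nat.min_eq_left (by omega)]
    have hb3 : s[i + fnl.length]? = some '(' := by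
      rw [← pvReg_getElem? s i j fnl.length (by omega), ← ht,
        List.getElem?_append_right (le_refl _)]
      simp
    exact ⟨hb1, by rw [← htake2, htake], hb3⟩
  · rintro ⟨hb1, hb2, hb3⟩
    refine ⟨pvReg s (i + fnl.length + 1) j, ?_⟩
    have hsplit : pvReg s i j = (pvReg s i j).take fnl.length ++ (pvReg s i j).drop fnl.length :=
      (List.take_append_drop _ _).symm
    have htake2 : (pvReg s i j).take fnl.length = (s.drop i).take fnl.length := by
      rw [pvReg, List.take_take, Nat.min_eq_left (by omega)]
    rw [hsplit, htake2, hb2, pvReg_drop s i j fnl.length,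
      pvReg_cons s (i + fnl.length) j '(' hb1 hb3, List.append_assoc, List.singleton_append]

lemma pvEndswith_reg (s : List Char) (i j : Nat) (hij : i < j) (hj : j ≤ s.length) :
    PySem.Chars.endswith (pvReg s i j) [')'] = true ↔ s[j-1]? = some ')' := by
  have hc : s[j-1]? = some s[j-1] := List.getElem?_eq_getElem (by omega)
  rw [PySem.Chars.endswith_iff, pvReg_snoc s i j s[j-1] hij hj hc]
  constructor
  · rintro ⟨t, ht⟩
    have hl := congrArg List.getLast? ht
    rw [List.getLast?_concat, List.getLast?_concat] at hl
    rw [hc, ← hl]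
  · intro h
    have hcc : s[j-1] = ')' := by
      rw [hc] at h
      simpa using h
    rw [hcc]
    exact ⟨pvReg s i (j-1), rfl⟩

lemma pvFinal_eq (s : List Char) (i j : Nat) (hij : i ≤ j) (hj : j ≤ s.length) (fnl : List Char) :
    pvFinalA (pvReg s i j) fnl = pvFinalB s (pvPartner s) i j fnl := by
  apply Bool.coe_iff_coe.mp
  have hB : pvFinalB s (pvPartner s) i j fnl = true ↔
      (i + fnl.length < j ∧ (s.drop i).take fnl.length = fnl ∧ s[i + fnl.length]? = some '('
        ∧ (pvPartner s).get? (i + fnl.length) = some (j - 1)) := by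
    simp [pvFinalB, Bool.and_eq_true, decide_eq_true_iff, beq_iff_eq, and_assoc]
  rw [hB]
  unfold pvFinalA
  by_cases hsw : PySem.Chars.startswith (pvReg s i j) (fnl ++ ['(']) = true
  · have hb123 := (pvStartswith_reg s i j hij hj fnl).mp hsw
    rcases hb123 with ⟨hb1, hb2, hb3⟩
    have hijlt : i < j := by omega
    have hdropn : (pvReg s i j).drop fnl.length = pvReg s (i + fnl.length) j :=
      pvReg_drop s i j fnl.length
    by_cases hew : PySem.Chars.endswith (pvReg s i j) [')'] = true
    · rw [if_pos ⟨hsw, hew⟩]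
      have hlast : s[j-1]? = some ')' := (pvEndswith_reg s i j hijlt hj).mp hew
      constructor
      · intro hsc
        have hsc' : pvScanA ((pvReg s i j).drop fnl.length) 0 = (true, 0) := by
          rcases Bool.and_eq_true_iff.mp hsc with ⟨h1, h2⟩
          have h2' : (pvScanA ((pvReg s i j).drop fnl.length) 0).2 = 0 := of_decide_eq_true h2
          exact Prod.ext h1 h2'
        rw [hdropn] at hsc'
        have hM : pvMatched s (i + fnl.length) (j - 1) :=
          (pvScanA_reg_iff s (i + fnl.length) j hb1 hj hb3).mp ⟨hlast, hsc'⟩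
        exact ⟨hb1, hb2, hb3, (pvPartner_iff s (i + fnl.length) (j - 1)).mpr hM⟩
      · rintro ⟨-, -, -, hpart⟩
        have hM : pvMatched s (i + fnl.length) (j - 1) :=
          (pvPartner_iff s (i + fnl.length) (j - 1)).mp hpart
        have hsc := ((pvScanA_reg_iff s (i + fnl.length) j hb1 hj hb3).mpr hM).2
        rw [← hdropn] at hsc
        rw [hsc]
        simp
    · rw [if_neg (fun hx => hew hx.2)]
      simp only [Bool.false_eq_true, false_iff]
      rintro ⟨-, -, -, hpart⟩
      have hM : pvMatched s (i + fnl.length) (j - 1) :=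
        (pvPartner_iff s (i + fnl.length) (j - 1)).mp hpart
      exact hew ((pvEndswith_reg s i j hijlt hj).mpr hM.2.1)
  · rw [if_neg (fun hx => hsw hx.1)]
    simp only [Bool.false_eq_true, false_iff]
    rintro ⟨hb1, hb2, hb3, -⟩
    exact hsw ((pvStartswith_reg s i j hij hj fnl).mpr ⟨hb1, hb2, hb3⟩)

-- ===== VERDICT (by name: the statement is the Claim_ definition above) =====
theorem is_direct_call_py_spec : Claim_equal_is_direct_call_py := by
  intro expr fn_name _
  unfold Spec_is_direct_call_py is_direct_call_py is_direct_call_py_alt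
  have h := pvStripOuter_reg (PySem.Chars.strip expr.toList) 0 (PySem.Chars.strip expr.toList).length
    (Nat.zero_le _) (le_refl _)
  rw [pvReg_all] at h
  rw [h.1, pvFinal_eq _ _ _ h.2.1 (h.2.2)]
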